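-- pv_equiv track=rewrite | github.com/wondernova/google-coding-interview | 01 Basic/test_01_anagram.py | anagram_backup
-- ===== SOURCE A (Python) =====
-- def anagram_backup(s1, s2):
--     s1 = s1.lower()
--     s2 = s2.lower()
--
--     check = list(s2)
--     correct = True
--     for c in s1:
--         pos = 0
--         found = False
--         for i in range(len(s2)):
--             if c == check[i]:
--                 found = True
--                 pos = i
--         if found:
--             check[pos] = None
--         else:
--             correct = False
--     return correct
-- ===== SOURCE B (Python) =====
-- def anagram_backup(s1, s2):
--     s1 = s1.lower()
--     s2 = s2.lower()
--     counts = {}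
--     for c in s2:
--         counts[c] = counts.get(c, 0) + 1
--     for c in s1:
--         n = counts.get(c, 0)
--         if n == 0:
--             return False
--         counts[c] = n - 1
--     return True
-- ===== Notes on version B (the rewrite author's own statement) =====
-- stated objective: faster
-- what changed: Replaced A's per-character full rescan of s2 with a counting dictionary built once over s2 and decremented in one pass over s1 (early False on deficit).
import Mathlib
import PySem

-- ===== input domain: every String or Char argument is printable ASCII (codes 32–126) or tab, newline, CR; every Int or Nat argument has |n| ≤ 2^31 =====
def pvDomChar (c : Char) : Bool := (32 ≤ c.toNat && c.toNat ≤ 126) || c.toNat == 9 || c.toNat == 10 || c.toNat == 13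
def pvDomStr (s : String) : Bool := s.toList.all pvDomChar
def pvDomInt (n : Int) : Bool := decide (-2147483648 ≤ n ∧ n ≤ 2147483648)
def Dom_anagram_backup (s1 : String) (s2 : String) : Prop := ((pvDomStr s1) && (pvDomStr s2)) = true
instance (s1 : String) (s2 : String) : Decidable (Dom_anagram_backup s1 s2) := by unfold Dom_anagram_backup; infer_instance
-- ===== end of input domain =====

-- B replaces A's per-character full rescan of s2 with a counter dict built once and decremented (faster).

-- ===== PORT A =====
-- inner 'for i in range(len(s2)): if c == check[i]: found = True; pos = i'
-- (c == None is False in Python, so a match means check[i] = some c)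
def pvScanA (c : Char) : List (Option Char) → Nat → Nat × Bool → Nat × Bool
  | [], _, st => st
  | x :: xs, i, st => pvScanA c xs (i + 1) (if x = some c then (i, true) else st)

-- outer 'for c in s1' with state (check, correct)
def pvRunA : List Char → List (Option Char) → Bool → Bool
  | [], _, correct => correct
  | c :: cs, check, correct =>
      let r := pvScanA c check 0 (0, false)
      if r.2 then pvRunA cs (check.set r.1 none) correct
      else pvRunA cs check false

def anagram_backup (s1 : String) (s2 : String) : Bool :=
  pvRunA (PySem.Str.lower s1).toList ((PySem.Str.lower s2).toList.map some) true

-- ===== PORT B =====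
-- 'for c in s1: n = counts.get(c, 0); if n == 0: return False; counts[c] = n - 1'
def pvRunB : List Char → PySem.Dict Char Int → Bool
  | [], _ => true
  | c :: cs, counts =>
      let n := counts.getD c 0
      if n = 0 then false else pvRunB cs (counts.insert c (n - 1))

def anagram_backup_alt (s1 : String) (s2 : String) : Bool :=
  let l1 := (PySem.Str.lower s1).toList
  let l2 := (PySem.Str.lower s2).toList
  pvRunB l1 (l2.foldl (fun d c => d.insert c (d.getD c 0 + 1)) PySem.Dict.empty)

-- ===== PRECONDITION & SPEC =====
def Spec_anagram_backup (s1 : String) (s2 : String) (out : Bool) : Prop := out = anagram_backup_alt s1 s2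
instance (s1 : String) (s2 : String) (out : Bool) : Decidable (Spec_anagram_backup s1 s2 out) := by unfold Spec_anagram_backup; infer_instance

-- ===== CLAIM (what is proved, stated in full; the proofs are below) =====
def Claim_equal_anagram_backup : Prop := ∀ (s1 : String) (s2 : String), Dom_anagram_backup s1 s2 → Spec_anagram_backup s1 s2 (anagram_backup s1 s2)

-- ===== LEMMAS AND PROOFS =====

-- abstract common form: consume one occurrence per character, false on deficit
def pvAbs : List Char → (Char → Nat) → Bool
  | [], _ => true
  | c :: cs, cnt => if cnt c = 0 then false else pvAbs cs (fun d => if d = c then cnt d - 1 else cnt d)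

theorem pvScanA_snd (c : Char) : ∀ (xs : List (Option Char)) (i : Nat) (st : Nat × Bool),
    (pvScanA c xs i st).2 = (st.2 || decide (some c ∈ xs)) := by
  intro xs
  induction xs with
  | nil => intro i st; simp [pvScanA]
  | cons x xs ih =>
      intro i st
      simp only [pvScanA, ih, List.mem_cons]
      by_cases hx : x = some c <;> simp [hx, eq_comm]

theorem pvScanA_pred (c : Char) (P : Nat → Prop) : ∀ (xs : List (Option Char)) (i : Nat) (st : Nat × Bool),
    (st.2 = true → P st.1) → (∀ j, xs[j]? = some (some c) → P (i + j)) →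
    (pvScanA c xs i st).2 = true → P (pvScanA c xs i st).1 := by
  intro xs
  induction xs with
  | nil => intro i st h1 _ h3; exact h1 h3
  | cons x xs ih =>
      intro i st h1 h2
      simp only [pvScanA]
      apply ih
      · intro hst
        by_cases hx : x = some c
        · simpa [hx] using h2 0 (by simp [hx])
        · simp only [hx, if_false] at hst ⊢
          exact h1 hst
      · intro j hj
        have := h2 (j + 1) (by simpa using hj)
        simpa [Nat.add_assoc, Nat.add_comm 1 j] using this

theorem pvRunA_false : ∀ (cs : List Char) (check : List (Option Char)),
    pvRunA cs check false = false := by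
  intro cs
  induction cs with
  | nil => intro check; rfl
  | cons c cs ih =>
      intro check
      simp only [pvRunA]
      split <;> exact ih _

theorem pvCountSet (l : List (Option Char)) (c : Char) (p : Nat) (hp : p < l.length)
    (hc : l[p] = some c) (d : Char) :
    (l.set p none).count (some d) = if d = c then l.count (some d) - 1 else l.count (some d) := by
  have hdecomp : l = l.take p ++ l[p] :: l.drop (p + 1) := by
    conv_lhs => rw [← List.take_append_drop p l]
    rw [List.drop_eq_getElem_cons hp]
  have hset : l.set p none = l.take p ++ none :: l.drop (p + 1) := by
    rw [List.set_eq_take_append_cons_drop, if_pos hp]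
  have hl := congrArg (List.count (some d)) hdecomp
  simp only [List.count_append, List.count_cons, hc] at hl
  rw [hset]
  simp only [List.count_append, List.count_cons]
  by_cases hdc : d = c
  · simp [hdc] at hl ⊢
    omega
  · have hdc' : ¬c = d := fun h => hdc h.symm
    simp [hdc, hdc'] at hl ⊢
    omega

theorem pvRunA_abs : ∀ (cs : List Char) (check : List (Option Char)),
    pvRunA cs check true = pvAbs cs (fun c => check.count (some c)) := by
  intro cs
  induction cs with
  | nil => intro check; rfl
  | cons c cs ih =>
      intro check
      simp only [pvRunA, pvAbs]
      have hsnd : (pvScanA c check 0 (0, false)).2 = decide (some c ∈ check) := by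
        simp [pvScanA_snd]
      by_cases hmem : some c ∈ check
      · have hcnt : check.count (some c) ≠ 0 := by
          simpa [List.count_eq_zero] using hmem
        have hP : (pvScanA c check 0 (0, false)).1 < check.length ∧
            check[(pvScanA c check 0 (0, false)).1]? = some (some c) := by
          apply pvScanA_pred c (fun p => p < check.length ∧ check[p]? = some (some c)) check 0 (0, false)
          · intro h; simp at h
          · intro j hj
            have hjlen : j < check.length := by
              by_contra hge
              simp [List.getElem?_eq_none (by omega : check.length ≤ j)] at hj
            exact ⟨by simpa using hjlen, by simpa using hj⟩
          · rw [hsnd]; simpa using hmem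
        obtain ⟨hplen, hpval⟩ := hP
        have hpval' : check[(pvScanA c check 0 (0, false)).1] = some c := by
          have := List.getElem?_eq_getElem hplen
          rw [this] at hpval
          exact Option.some.inj hpval
        rw [hsnd, if_pos (by simpa using hmem), if_neg hcnt, ih]
        congr 1
        funext d
        exact pvCountSet check c _ hplen hpval' d
      · have hcnt : check.count (some c) = 0 := by
          simpa [List.count_eq_zero] using hmem
        rw [hsnd, if_neg (by simpa using hmem), if_pos hcnt, pvRunA_false]

theorem pvCounterGetD : ∀ (l : List Char) (d0 : PySem.Dict Char Int) (c : Char),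
    (l.foldl (fun d c => d.insert c (d.getD c 0 + 1)) d0).getD c 0 = d0.getD c 0 + l.count c := by
  intro l
  induction l with
  | nil => intro d0 c; simp
  | cons x xs ih =>
      intro d0 c
      simp only [List.foldl_cons, ih, PySem.Dict.getD_insert, List.count_cons]
      by_cases hcx : c = x
      · simp [hcx]
        ring
      · have hxc : ¬x = c := fun h => hcx h.symm
        simp [hcx, hxc]

theorem pvRunB_abs : ∀ (cs : List Char) (counts : PySem.Dict Char Int) (cnt : Char → Nat),
    (∀ c, counts.getD c 0 = (cnt c : Int)) → pvRunB cs counts = pvAbs cs cnt := by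
  intro cs
  induction cs with
  | nil => intro counts cnt _; rfl
  | cons c cs ih =>
      intro counts cnt hcnt
      simp only [pvRunB, pvAbs, hcnt]
      by_cases h0 : cnt c = 0
      · simp [h0]
      · rw [if_neg (by exact_mod_cast h0), if_neg h0]
        apply ih
        intro d
        rw [PySem.Dict.getD_insert, hcnt]
        by_cases hdc : d = c
        · simp [hdc]
          omega
        · simp [hdc]

-- ===== VERDICT (by name: the statement is the Claim_ definition above) =====
theorem anagram_backup_spec : Claim_equal_anagram_backup := by
  intro s1 s2 _
  unfold Spec_anagram_backup anagram_backup anagram_backup_alt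
  rw [pvRunA_abs]
  apply Eq.symm
  apply pvRunB_abs
  intro c
  rw [pvCounterGetD]
  simp [List.count_map_of_injective _ _ (fun a b => Option.some.inj)]
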